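-- pv_equiv track=rewrite | github.com/katehewett/LO_user | extract/mixed_layer/test_sml.py | find_consecutive_true
-- ===== SOURCE A (Python) =====
-- def find_consecutive_true(list1):
--     """
--     Finds consecutive true statements in a list.
--
--     Args:
--         list1 (list): A list of boolean values.
--
--     Returns:
--         list: A list of lists, where each sublist contains the indices of the
--         consecutive true statements in the original list.
--     """
--
--     result = []
--     start = 0
--     for i in range(len(list1)):
--         if list1[i]:
--             if i == start:
--                 result.append([i])
--             else:
--                 result[-1].append(i)
--         else:
--             start = i + 1
--     return result
-- ===== SOURCE B (Python) =====
-- from itertools import groupby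
--
-- def find_consecutive_true(list1):
--     result = []
--     idx = 0
--     for key, group in groupby(list1, key=bool):
--         n = sum(1 for _ in group)
--         if key:
--             result.append(list(range(idx, idx + n)))
--         idx += n
--     return result
-- ===== Notes on version B (the rewrite author's own statement) =====
-- stated objective: idiomatic
-- what changed: Replaces the element-by-element start-index bookkeeping (with append-to-last-sublist) by run-length grouping via itertools.groupby and range() generation per true run.
import Mathlib
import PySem

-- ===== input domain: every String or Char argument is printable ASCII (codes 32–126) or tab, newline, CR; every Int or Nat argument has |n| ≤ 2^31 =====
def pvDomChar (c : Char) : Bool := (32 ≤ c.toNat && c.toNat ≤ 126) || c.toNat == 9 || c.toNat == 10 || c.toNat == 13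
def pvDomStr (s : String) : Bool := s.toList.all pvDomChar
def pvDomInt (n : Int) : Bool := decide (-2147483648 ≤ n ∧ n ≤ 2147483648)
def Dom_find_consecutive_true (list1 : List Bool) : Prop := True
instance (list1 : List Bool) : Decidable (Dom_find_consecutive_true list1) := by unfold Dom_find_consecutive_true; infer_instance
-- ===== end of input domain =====

-- B replaces A's element-by-element start-index bookkeeping by run-length grouping
-- (itertools.groupby) with one range() per true run; same cost, more idiomatic.

-- ===== PORT A =====
-- result[-1].append(i), ported functionally: rebuild the list with its last sublist extended
def pvAppendLast : List (List Int) → Int → List (List Int)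
  | [], _ => []
  | l :: rest, v => if rest.isEmpty then [l ++ [v]] else l :: pvAppendLast rest v

def pvAGo : List Bool → Int → Int → List (List Int) → List (List Int)
  | [], _, _, result => result
  | x :: rest, i, start, result =>
    if x then
      if i = start then pvAGo rest (i+1) start (result ++ [[i]])
      else pvAGo rest (i+1) start (pvAppendLast result i)
    else pvAGo rest (i+1) (i+1) result

def find_consecutive_true (list1 : List Bool) : List (List Int) :=
  pvAGo list1 0 0 []

-- ===== PORT B =====
-- one step per groupby group: n = group length, emit range(idx, idx+n) for a true group
def pvBGo : List Bool → Int → List (List Int)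
  | [], _ => []
  | b :: rest, idx =>
    let n : Int := 1 + ((rest.takeWhile (· == b)).length : Int)
    let res := pvBGo (rest.dropWhile (· == b)) (idx + n)
    if b then PySem.List.pyRange idx (idx + n) 1 :: res else res
  termination_by xs _ => xs.length
  decreasing_by
    simp only [List.length_cons]
    exact Nat.lt_succ_of_le (List.length_dropWhile_le _ _)

def find_consecutive_true_alt (list1 : List Bool) : List (List Int) :=
  pvBGo list1 0

-- ===== PRECONDITION & SPEC =====
def Spec_find_consecutive_true (list1 : List Bool) (out : List (List Int)) : Prop := out = find_consecutive_true_alt list1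
instance (list1 : List Bool) (out : List (List Int)) : Decidable (Spec_find_consecutive_true list1 out) := by unfold Spec_find_consecutive_true; infer_instance

-- ===== CLAIM (what is proved, stated in full; the proofs are below) =====
def Claim_equal_find_consecutive_true : Prop := ∀ (list1 : List Bool), Dom_find_consecutive_true list1 → Spec_find_consecutive_true list1 (find_consecutive_true list1)

-- ===== LEMMAS AND PROOFS =====

theorem pvAppendLast_snoc (res : List (List Int)) (p : List Int) (v : Int) :
    pvAppendLast (res ++ [p]) v = res ++ [p ++ [v]] := by
  induction res with
  | nil => simp [pvAppendLast]
  | cons r rs ih => simp [pvAppendLast, ih]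

-- a false element at the front merges into B's grouping of the rest
theorem pvBGo_false (xs : List Bool) (i : Int) :
    pvBGo (false :: xs) i = pvBGo xs (i + 1) := by
  cases xs with
  | nil => simp [pvBGo]
  | cons y ys =>
    cases y with
    | false =>
      rw [pvBGo, pvBGo]
      simp only [List.takeWhile, List.dropWhile]
      norm_num
      ring_nf
    | true =>
      rw [pvBGo]
      simp [List.takeWhile, List.dropWhile]

-- main invariant: P (at a run boundary, start = i) and Q (inside a true run, start < i)
theorem pvMain : ∀ (n : Nat) (xs : List Bool), xs.length ≤ n →
    (∀ (i : Int) (res : List (List Int)), pvAGo xs i i res = res ++ pvBGo xs i) ∧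
    (∀ (i s : Int) (res : List (List Int)) (p : List Int), s < i →
      pvAGo xs i s (res ++ [p]) =
        res ++ (p ++ PySem.List.pyRange i (i + ((xs.takeWhile (· == true)).length : Int)) 1)
          :: pvBGo (xs.dropWhile (· == true)) (i + ((xs.takeWhile (· == true)).length : Int))) := by
  intro n
  induction n with
  | zero =>
    intro xs h
    have hx : xs = [] := List.eq_nil_of_length_eq_zero (Nat.le_zero.mp h)
    subst hx
    constructor
    · intro i res; simp [pvAGo, pvBGo]
    · intro i s res p hs
      simp [pvAGo, pvBGo, List.takeWhile, List.dropWhile, PySem.List.pyRange_one_eq_nil le_rfl]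
  | succ n ih =>
    intro xs h
    cases xs with
    | nil =>
      constructor
      · intro i res; simp [pvAGo, pvBGo]
      · intro i s res p hs
        simp [pvAGo, pvBGo, List.takeWhile, List.dropWhile, PySem.List.pyRange_one_eq_nil le_rfl]
    | cons x ys =>
      have hy : ys.length <= n := Nat.le_of_succ_le_succ h
      constructor
      · -- P
        intro i res
        cases x with
        | false =>
          rw [pvAGo]
          simp only [Bool.false_eq_true, if_false]
          rw [(ih ys hy).1 (i+1) res, pvBGo_false]
        | true =>
          rw [pvAGo]
          simp only [if_true]
          rw [(ih ys hy).2 (i+1) i res [i] (by omega)]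
          rw [pvBGo]
          set k : Int := ((ys.takeWhile (fun x => x == true)).length : Int) with hk
          have hk0 : 0 <= k := by positivity
          have harg : i + (1 + k) = i + 1 + k := by ring
          have hcons : PySem.List.pyRange i (i + 1 + k) 1
              = i :: PySem.List.pyRange (i+1) (i + 1 + k) 1 :=
            PySem.List.pyRange_one_cons (by omega)
          simp only [if_true, harg, hcons]
          simp
      · -- Q
        intro i s res p hs
        cases x with
        | false =>
          rw [pvAGo]
          simp only [Bool.false_eq_true, if_false]
          rw [(ih ys hy).1 (i+1) (res ++ [p])]
          have ht : List.takeWhile (fun x => x == true) (false :: ys) = [] := by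
            simp [List.takeWhile]
          have hd : List.dropWhile (fun x => x == true) (false :: ys) = false :: ys := by
            simp [List.dropWhile]
          simp only [ht, hd, List.length_nil, Nat.cast_zero, add_zero]
          rw [pvBGo_false]
          simp [PySem.List.pyRange_one_eq_nil le_rfl]
        | true =>
          rw [pvAGo]
          simp only [if_true, if_neg (by omega : ¬ i = s)]
          rw [pvAppendLast_snoc, (ih ys hy).2 (i+1) s res (p ++ [i]) (by omega)]
          have ht : List.takeWhile (fun x => x == true) (true :: ys)
              = true :: ys.takeWhile (fun x => x == true) := by
            simp [List.takeWhile]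
          have hd : List.dropWhile (fun x => x == true) (true :: ys)
              = ys.dropWhile (fun x => x == true) := by
            simp [List.dropWhile]
          simp only [ht, hd, List.length_cons, Nat.cast_add, Nat.cast_one]
          set k : Int := ((ys.takeWhile (fun x => x == true)).length : Int) with hk
          have hk0 : 0 <= k := by positivity
          have harg : i + (k + 1) = i + 1 + k := by ring
          have hcons : PySem.List.pyRange i (i + 1 + k) 1
              = i :: PySem.List.pyRange (i+1) (i + 1 + k) 1 :=
            PySem.List.pyRange_one_cons (by omega)
          simp only [harg, hcons]
          simp

-- ===== VERDICT (by name: the statement is the Claim_ definition above) =====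
theorem find_consecutive_true_spec : Claim_equal_find_consecutive_true := by
  intro list1 _
  unfold Spec_find_consecutive_true find_consecutive_true find_consecutive_true_alt
  simpa using (pvMain list1.length list1 le_rfl).1 0 []
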